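-- pv_equiv track=rewrite | github.com/omertt27/ai-stanbul | backend/data/events_database.py | _event_matches_month
-- ===== SOURCE A (Python) =====
-- def _event_matches_month(date_str: str, target_month: int) -> bool:
--     """Helper to check if a date string matches a target month"""
--     if not date_str:
--         return False
--
--     month_names = {
--         'january': 1, 'ocak': 1,
--         'february': 2, 'şubat': 2,
--         'march': 3, 'mart': 3,
--         'april': 4, 'nisan': 4,
--         'may': 5, 'mayıs': 5,
--         'june': 6, 'haziran': 6,
--         'july': 7, 'temmuz': 7,
--         'august': 8, 'ağustos': 8,
--         'september': 9, 'eylül': 9,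
--         'october': 10, 'ekim': 10,
--         'november': 11, 'kasım': 11,
--         'december': 12, 'aralık': 12,
--     }
--
--     date_lower = date_str.lower()
--     for month_name, month_num in month_names.items():
--         if month_name in date_lower and month_num == target_month:
--             return True
--
--     return False
-- ===== SOURCE B (Python) =====
-- _BY_MONTH = {
--     1: ('january', 'ocak'),
--     2: ('february', 'şubat'),
--     3: ('march', 'mart'),
--     4: ('april', 'nisan'),
--     5: ('may', 'mayıs'),
--     6: ('june', 'haziran'),
--     7: ('july', 'temmuz'),
--     8: ('august', 'ağustos'),
--     9: ('september', 'eylül'),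
--     10: ('october', 'ekim'),
--     11: ('november', 'kasım'),
--     12: ('december', 'aralık'),
-- }
--
-- def _event_matches_month(date_str: str, target_month: int) -> bool:
--     """Helper to check if a date string matches a target month"""
--     if not date_str:
--         return False
--     date_lower = date_str.lower()
--     return any(name in date_lower for name in _BY_MONTH.get(target_month, ()))
-- ===== Notes on version B (the rewrite author's own statement) =====
-- stated objective: idiomatic
-- what changed: Replaces the full scan over all 24 name->number pairs (filtering on month number inside the loop) by an inverted month->names table built once, so only the target month's two names are tested for substring containment after a single direct lookup.
import Mathlib
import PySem

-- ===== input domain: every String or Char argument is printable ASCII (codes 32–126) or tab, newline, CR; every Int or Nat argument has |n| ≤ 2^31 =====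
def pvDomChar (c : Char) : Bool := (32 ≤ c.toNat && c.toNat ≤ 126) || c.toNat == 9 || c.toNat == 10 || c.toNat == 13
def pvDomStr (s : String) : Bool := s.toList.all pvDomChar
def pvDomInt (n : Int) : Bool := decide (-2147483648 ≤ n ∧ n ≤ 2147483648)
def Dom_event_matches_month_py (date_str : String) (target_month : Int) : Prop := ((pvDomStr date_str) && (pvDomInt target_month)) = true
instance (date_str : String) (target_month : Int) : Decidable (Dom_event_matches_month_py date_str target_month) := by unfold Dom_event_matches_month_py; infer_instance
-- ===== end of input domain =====

-- B replaces A's scan over all 24 name→number pairs by a single lookup in an inverted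
-- month→names table, testing only the target month's two names (idiomatic/alternative; same results).

-- ===== PORT A =====
-- the dict month_names, in insertion order, as an association list
def pvMonthNames : List (String × Int) :=
  [("january", 1), ("ocak", 1), ("february", 2), ("şubat", 2), ("march", 3), ("mart", 3),
   ("april", 4), ("nisan", 4), ("may", 5), ("mayıs", 5), ("june", 6), ("haziran", 6),
   ("july", 7), ("temmuz", 7), ("august", 8), ("ağustos", 8), ("september", 9), ("eylül", 9),
   ("october", 10), ("ekim", 10), ("november", 11), ("kasım", 11), ("december", 12), ("aralık", 12)]

def event_matches_month_py (date_str : String) (target_month : Int) : Bool :=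
  if date_str = "" then false
  else
    let date_lower := PySem.Str.lower date_str
    -- 'for …: if …: return True' over dict items = any over the pairs
    pvMonthNames.any (fun p => PySem.Str.isIn p.1 date_lower && p.2 == target_month)

-- ===== PORT B =====
def pvByMonth : PySem.Dict Int (List String) :=
  PySem.Dict.mk
    [(1, ["january", "ocak"]), (2, ["february", "şubat"]), (3, ["march", "mart"]),
     (4, ["april", "nisan"]), (5, ["may", "mayıs"]), (6, ["june", "haziran"]),
     (7, ["july", "temmuz"]), (8, ["august", "ağustos"]), (9, ["september", "eylül"]),
     (10, ["october", "ekim"]), (11, ["november", "kasım"]), (12, ["december", "aralık"])]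

def event_matches_month_py_alt (date_str : String) (target_month : Int) : Bool :=
  if date_str = "" then false
  else
    let date_lower := PySem.Str.lower date_str
    (PySem.Dict.getD pvByMonth target_month []).any (fun name => PySem.Str.isIn name date_lower)

-- ===== PRECONDITION & SPEC =====
def Spec_event_matches_month_py (date_str : String) (target_month : Int) (out : Bool) : Prop := out = event_matches_month_py_alt date_str target_month
instance (date_str : String) (target_month : Int) (out : Bool) : Decidable (Spec_event_matches_month_py date_str target_month out) := by unfold Spec_event_matches_month_py; infer_instance

-- ===== CLAIM (what is proved, stated in full; the proofs are below) =====
def Claim_equal_event_matches_month_py : Prop := ∀ (date_str : String) (target_month : Int), Dom_event_matches_month_py date_str target_month → Spec_event_matches_month_py date_str target_month (event_matches_month_py date_str target_month)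

-- ===== LEMMAS AND PROOFS =====
-- the two literal tables agree for every target month: the filtered scan equals the direct lookup
theorem pv_tables_agree (dl : String) (m : Int) :
    pvMonthNames.any (fun p => PySem.Str.isIn p.1 dl && p.2 == m)
      = (PySem.Dict.getD pvByMonth m []).any (fun name => PySem.Str.isIn name dl) := by
  by_cases h1 : m = 1
  · subst h1; simp [pvMonthNames, pvByMonth, PySem.Dict.getD, PySem.Dict.get?]
  by_cases h2 : m = 2
  · subst h2; simp [pvMonthNames, pvByMonth, PySem.Dict.getD, PySem.Dict.get?]
  by_cases h3 : m = 3
  · subst h3; simp [pvMonthNames, pvByMonth, PySem.Dict.getD, PySem.Dict.get?]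
  by_cases h4 : m = 4
  · subst h4; simp [pvMonthNames, pvByMonth, PySem.Dict.getD, PySem.Dict.get?]
  by_cases h5 : m = 5
  · subst h5; simp [pvMonthNames, pvByMonth, PySem.Dict.getD, PySem.Dict.get?]
  by_cases h6 : m = 6
  · subst h6; simp [pvMonthNames, pvByMonth, PySem.Dict.getD, PySem.Dict.get?]
  by_cases h7 : m = 7
  · subst h7; simp [pvMonthNames, pvByMonth, PySem.Dict.getD, PySem.Dict.get?]
  by_cases h8 : m = 8
  · subst h8; simp [pvMonthNames, pvByMonth, PySem.Dict.getD, PySem.Dict.get?]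
  by_cases h9 : m = 9
  · subst h9; simp [pvMonthNames, pvByMonth, PySem.Dict.getD, PySem.Dict.get?]
  by_cases h10 : m = 10
  · subst h10; simp [pvMonthNames, pvByMonth, PySem.Dict.getD, PySem.Dict.get?]
  by_cases h11 : m = 11
  · subst h11; simp [pvMonthNames, pvByMonth, PySem.Dict.getD, PySem.Dict.get?]
  by_cases h12 : m = 12
  · subst h12; simp [pvMonthNames, pvByMonth, PySem.Dict.getD, PySem.Dict.get?]
  · simp [pvMonthNames, pvByMonth, PySem.Dict.getD, PySem.Dict.get?,
      Ne.symm h1, Ne.symm h2, Ne.symm h3, Ne.symm h4, Ne.symm h5, Ne.symm h6,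
      Ne.symm h7, Ne.symm h8, Ne.symm h9, Ne.symm h10, Ne.symm h11, Ne.symm h12]

-- ===== VERDICT (by name: the statement is the Claim_ definition above) =====
theorem event_matches_month_py_spec : Claim_equal_event_matches_month_py := by
  intro date_str target_month _
  unfold Spec_event_matches_month_py event_matches_month_py event_matches_month_py_alt
  by_cases h : date_str = ""
  · simp [h]
  · simp only [h, if_false]
    exact pv_tables_agree (PySem.Str.lower date_str) target_month
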